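-- pv_equiv track=rewrite | github.com/buildspacex-cell/sakhi | sakhi/apps/engine/micro_journey/sequencer.py | compute_flow_effort
-- ===== SOURCE A (Python) =====
-- from typing import Dict, List
--
-- LOW_EFFORT_KEYWORDS = {"clean", "water", "stretch", "check", "tidy"}
--
-- MID_EFFORT_KEYWORDS = {"review", "organize", "summarize"}
--
-- HIGH_EFFORT_KEYWORDS = {"plan", "write", "focus block"}
--
-- VERY_HIGH_EFFORT_KEYWORDS = {"deep work", "creative block"}
--
-- def compute_flow_effort(flow: Dict) -> int:
--     """Deterministic effort score based on text keywords."""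
--     text_parts: List[str] = []
--     for key in ("warmup_step", "focus_block_step", "closure_step", "optional_reward"):
--         val = flow.get(key)
--         if isinstance(val, str):
--             text_parts.append(val.lower())
--     text = " ".join(text_parts)
--     score = 1
--     if any(k in text for k in VERY_HIGH_EFFORT_KEYWORDS):
--         score = 4
--     elif any(k in text for k in HIGH_EFFORT_KEYWORDS):
--         score = 3
--     elif any(k in text for k in MID_EFFORT_KEYWORDS):
--         score = 2
--     elif any(k in text for k in LOW_EFFORT_KEYWORDS):
--         score = 1
--     return score
-- ===== SOURCE B (Python) =====
-- EFFORT_TABLE = {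
--     "deep work": 4, "creative block": 4,
--     "plan": 3, "write": 3, "focus block": 3,
--     "review": 2, "organize": 2, "summarize": 2,
--     "clean": 1, "water": 1, "stretch": 1, "check": 1, "tidy": 1,
-- }
--
-- def compute_flow_effort(flow):
--     """Deterministic effort score based on text keywords."""
--     text = " ".join(
--         flow[key].lower()
--         for key in ("warmup_step", "focus_block_step", "closure_step", "optional_reward")
--         if isinstance(flow.get(key), str)
--     )
--     return max((s for kw, s in EFFORT_TABLE.items() if kw in text), default=1)
-- ===== Notes on version B (the rewrite author's own statement) =====
-- stated objective: simpler
-- what changed: Replaces the four-tier if/elif cascade over four keyword sets by a single flat keyword-to-score table and one max-reduction over the matching entries (default 1).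
import Mathlib
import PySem

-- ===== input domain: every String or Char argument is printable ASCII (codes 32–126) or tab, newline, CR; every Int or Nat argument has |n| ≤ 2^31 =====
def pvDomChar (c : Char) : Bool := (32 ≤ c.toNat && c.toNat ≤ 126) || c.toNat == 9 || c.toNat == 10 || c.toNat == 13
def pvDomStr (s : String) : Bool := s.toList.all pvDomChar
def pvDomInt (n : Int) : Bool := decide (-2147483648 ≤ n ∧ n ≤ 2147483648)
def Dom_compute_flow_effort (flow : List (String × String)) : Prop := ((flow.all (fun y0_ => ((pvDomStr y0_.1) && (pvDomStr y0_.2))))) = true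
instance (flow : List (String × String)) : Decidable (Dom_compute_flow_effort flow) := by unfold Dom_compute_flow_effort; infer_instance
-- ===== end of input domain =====

-- B replaces A's four-tier if/elif cascade by one flat keyword→score table and a max-reduction (objective: simpler).

-- ===== PORT A =====
-- the four keys A scans, in its tuple order
def pvStepKeys : List String :=
  ["warmup_step", "focus_block_step", "closure_step", "optional_reward"]
def pvLowKw : List String := ["clean", "water", "stretch", "check", "tidy"]
def pvMidKw : List String := ["review", "organize", "summarize"]
def pvHighKw : List String := ["plan", "write", "focus block"]
def pvVeryHighKw : List String := ["deep work", "creative block"]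

def compute_flow_effort (flow : List (String × String)) : Int :=
  -- the loop: val = flow.get(key); if isinstance(val, str): text_parts.append(val.lower())
  -- (all stored values are str under the type convention, so isinstance filters exactly the missing keys)
  let text_parts : List String := pvStepKeys.foldl (fun acc key =>
    match (PySem.Dict.mk flow).get? key with
    | some val => acc ++ [PySem.Str.lower val]
    | none => acc) []
  let text := PySem.Str.join " " text_parts
  let score : Int := 1
  if pvVeryHighKw.any (fun k => PySem.Str.isIn k text) then 4
  else if pvHighKw.any (fun k => PySem.Str.isIn k text) then 3
  else if pvMidKw.any (fun k => PySem.Str.isIn k text) then 2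
  else if pvLowKw.any (fun k => PySem.Str.isIn k text) then 1
  else score

-- ===== PORT B =====
def pvEffortTable : List (String × Int) :=
  [("deep work", 4), ("creative block", 4),
   ("plan", 3), ("write", 3), ("focus block", 3),
   ("review", 2), ("organize", 2), ("summarize", 2),
   ("clean", 1), ("water", 1), ("stretch", 1), ("check", 1), ("tidy", 1)]

def compute_flow_effort_alt (flow : List (String × String)) : Int :=
  let text := PySem.Str.join " "
    (pvStepKeys.filterMap (fun key => ((PySem.Dict.mk flow).get? key).map PySem.Str.lower))
  PySem.List.maxD ((pvEffortTable.filter (fun p => PySem.Str.isIn p.1 text)).map (·.2)) id 1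

-- ===== PRECONDITION & SPEC =====
def Spec_compute_flow_effort (flow : List (String × String)) (out : Int) : Prop := out = compute_flow_effort_alt flow
instance (flow : List (String × String)) (out : Int) : Decidable (Spec_compute_flow_effort flow out) := by unfold Spec_compute_flow_effort; infer_instance

-- ===== CLAIM (what is proved, stated in full; the proofs are below) =====
def Claim_equal_compute_flow_effort : Prop := ∀ (flow : List (String × String)), Dom_compute_flow_effort flow → Spec_compute_flow_effort flow (compute_flow_effort flow)

-- ===== LEMMAS AND PROOFS =====

-- A's append-loop over the keys builds exactly B's filterMap of the same keys
theorem pv_parts_eq (d : PySem.Dict String String) (keys : List String) (acc : List String) :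
    keys.foldl (fun acc key =>
      match d.get? key with
      | some val => acc ++ [PySem.Str.lower val]
      | none => acc) acc
    = acc ++ keys.filterMap (fun key => (d.get? key).map PySem.Str.lower) := by
  induction keys generalizing acc with
  | nil => simp
  | cons k ks ih =>
    cases h : d.get? k with
    | none => simp [List.foldl, h, ih]
    | some v => simp [List.foldl, h, ih]

-- filtering a list is filtering it zipped with its own predicate values (lets the table's
-- thirteen match-booleans be abstracted for the finite check below)
theorem pv_filter_map_zip {α β : Type} (l : List α) (q : α → Bool) (f : α → β) :
    (l.filter q).map f = ((l.zip (l.map q)).filter (fun p => p.2)).map (fun p => f p.1) := by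
  induction l with
  | nil => rfl
  | cons x xs ih => cases hq : q x <;> simp [List.filter, hq, ih]

-- the finite core: for any combination of match-booleans, max over the flat table's matching
-- scores (default 1) equals the tiered cascade
theorem pv_bool_table (a b c d e f g h i j k l m : Bool) :
    PySem.List.maxD
      ((((pvEffortTable.zip [a,b,c,d,e,f,g,h,i,j,k,l,m]).filter (fun p => p.2)).map (fun p => p.1.2))) id 1 =
      (if a || b then (4:Int)
       else if c || (d || e) then 3
       else if f || (g || h) then 2
       else if i || (j || (k || (l || m))) then 1
       else 1) := by
  revert a b c d e f g h i j k l m; decide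

theorem pv_table_eq (text : String) :
    PySem.List.maxD ((pvEffortTable.filter (fun p => PySem.Str.isIn p.1 text)).map (·.2)) id 1 =
      (if pvVeryHighKw.any (fun k => PySem.Str.isIn k text) then (4:Int)
       else if pvHighKw.any (fun k => PySem.Str.isIn k text) then 3
       else if pvMidKw.any (fun k => PySem.Str.isIn k text) then 2
       else if pvLowKw.any (fun k => PySem.Str.isIn k text) then 1
       else 1) := by
  rw [pv_filter_map_zip pvEffortTable (fun p => PySem.Str.isIn p.1 text) (fun p => p.2)]
  have hm : pvEffortTable.map (fun p => PySem.Str.isIn p.1 text) =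
      [PySem.Str.isIn "deep work" text, PySem.Str.isIn "creative block" text,
       PySem.Str.isIn "plan" text, PySem.Str.isIn "write" text, PySem.Str.isIn "focus block" text,
       PySem.Str.isIn "review" text, PySem.Str.isIn "organize" text, PySem.Str.isIn "summarize" text,
       PySem.Str.isIn "clean" text, PySem.Str.isIn "water" text, PySem.Str.isIn "stretch" text,
       PySem.Str.isIn "check" text, PySem.Str.isIn "tidy" text] := rfl
  rw [hm]
  simp only [pvVeryHighKw, pvHighKw, pvMidKw, pvLowKw, List.any_cons, List.any_nil, Bool.or_false]
  exact pv_bool_table _ _ _ _ _ _ _ _ _ _ _ _ _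

-- ===== VERDICT (by name: the statement is the Claim_ definition above) =====
theorem compute_flow_effort_spec : Claim_equal_compute_flow_effort := by
  intro flow _
  unfold Spec_compute_flow_effort compute_flow_effort compute_flow_effort_alt
  rw [pv_parts_eq (PySem.Dict.mk flow) pvStepKeys []]
  simp only [List.nil_append]
  rw [pv_table_eq]
  rfl
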